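-- pv_equiv track=rewrite | github.com/BrayanSolanoF/EjerciciosPython | Suma_Matriz.py | suma_matriz_aux
-- ===== SOURCE A (Python) =====
-- def suma_matriz_aux(Mat1, Mat2, n, m, i, j):
--     if i==n:
--         return Mat1
--     elif j==m:
--         return suma_matriz_aux(Mat1, Mat2, n, m, i+1, 0)
--     else:
--         Mat1[i][j]=Mat1[i][j]+Mat2[i][j]
--         return suma_matriz_aux(Mat1, Mat2, n, m, i, j+1)
-- ===== SOURCE B (Python) =====
-- def suma_matriz_aux(Mat1, Mat2, n, m, i, j):
--     while i != n:
--         if j == m: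
--             i += 1
--             j = 0
--         else:
--             Mat1[i][j] = Mat1[i][j] + Mat2[i][j]
--             j += 1
--     return Mat1
-- ===== Notes on version B (the rewrite author's own statement) =====
-- stated objective: simpler
-- what changed: Replaced the one-Python-call-frame-per-cell tail recursion by a plain iterative while loop that updates the same (i, j) state in place, removing the recursion (and its recursion-depth limit) entirely.
import Mathlib
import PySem

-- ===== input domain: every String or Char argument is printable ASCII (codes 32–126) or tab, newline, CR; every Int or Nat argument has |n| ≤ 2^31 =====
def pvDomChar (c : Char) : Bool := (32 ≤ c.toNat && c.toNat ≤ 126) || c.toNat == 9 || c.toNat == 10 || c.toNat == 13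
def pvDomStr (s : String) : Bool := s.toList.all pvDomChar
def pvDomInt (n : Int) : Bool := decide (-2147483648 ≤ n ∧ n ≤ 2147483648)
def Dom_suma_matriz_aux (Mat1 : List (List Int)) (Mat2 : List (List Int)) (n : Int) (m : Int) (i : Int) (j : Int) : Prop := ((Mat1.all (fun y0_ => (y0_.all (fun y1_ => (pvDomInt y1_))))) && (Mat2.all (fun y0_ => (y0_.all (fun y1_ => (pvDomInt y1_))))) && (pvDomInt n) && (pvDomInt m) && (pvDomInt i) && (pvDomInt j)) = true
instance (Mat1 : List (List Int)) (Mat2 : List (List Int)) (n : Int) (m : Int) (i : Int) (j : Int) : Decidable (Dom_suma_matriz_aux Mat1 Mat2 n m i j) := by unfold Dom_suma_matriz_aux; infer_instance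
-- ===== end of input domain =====

-- B replaces A's per-cell tail recursion by an iterative while loop over the same (i, j) state
-- (simpler: no recursion, no call-frame per cell). Both A and B mutate Mat1 in place in Python;
-- the equivalence proved here is about the RETURN value (the mutated Mat1; both perform the same
-- cell updates in the same order).

-- ===== PORT A =====
-- Port of the Python statement 'Mat1[i][j] = Mat1[i][j] + Mat2[i][j]' (appears verbatim in both A and B).
-- The 'none' fallbacks are the IndexError cases, excluded by Pre_.
def pvAddCell (Mat1 : List (List Int)) (Mat2 : List (List Int)) (i : Int) (j : Int) : List (List Int) :=
  match PySem.List.pyGet? Mat1 i, PySem.List.pyGet? Mat2 i with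
  | some r1, some r2 =>
    match PySem.List.pyGet? r1 j, PySem.List.pyGet? r2 j with
    | some a, some b => PySem.List.pySetD Mat1 i (PySem.List.pySetD r1 j (a + b))
    | _, _ => Mat1
  | _, _ => Mat1

-- enough fuel for every input admitted by Pre_ (fuel exhaustion = Python divergence/IndexError, outside Pre_)
def pvFuel (n m i j : Int) : Nat := (n - i).toNat * (m.toNat + 1) + (m - j).toNat + 1

-- A's recursion, made total with the fuel counter: a literal transliteration of A's three branches.
def pvFuelA : Nat → List (List Int) → List (List Int) → Int → Int → Int → Int → List (List Int)
  | 0, Mat1, _, _, _, _, _ => Mat1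
  | fuel+1, Mat1, Mat2, n, m, i, j =>
    if i = n then Mat1
    else if j = m then pvFuelA fuel Mat1 Mat2 n m (i+1) 0
    else pvFuelA fuel (pvAddCell Mat1 Mat2 i j) Mat2 n m i (j+1)

def suma_matriz_aux (Mat1 : List (List Int)) (Mat2 : List (List Int)) (n : Int) (m : Int) (i : Int) (j : Int) : List (List Int) :=
  pvFuelA (pvFuel n m i j) Mat1 Mat2 n m i j

-- ===== PORT B =====
-- B's while-loop body as a step function on the loop state (Mat1, i, j): one iteration of the loop.
def pvStepB (Mat2 : List (List Int)) (m : Int) : List (List Int) × Int × Int → List (List Int) × Int × Int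
  | (M, i, j) => if j = m then (M, i + 1, 0) else (pvAddCell M Mat2 i j, i, j + 1)

-- the while loop: iterate the step while the guard i ≠ n holds, made total by the fuel counter.
def pvWhileB (Mat2 : List (List Int)) (n : Int) (m : Int) : Nat → List (List Int) × Int × Int → List (List Int) × Int × Int
  | 0, s => s
  | fuel+1, s => if s.2.1 = n then s else pvWhileB Mat2 n m fuel (pvStepB Mat2 m s)

def suma_matriz_aux_alt (Mat1 : List (List Int)) (Mat2 : List (List Int)) (n : Int) (m : Int) (i : Int) (j : Int) : List (List Int) :=
  (pvWhileB Mat2 n m (pvFuel n m i j) (Mat1, i, j)).1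

-- ===== PRECONDITION & SPEC =====
-- validity of the cells the walk touches in one row: row r valid in both matrices (Python indexing,
-- negative r from the end) and every column of [s, m) valid, stated by its two endpoints.
def pvRowOK (Mat1 : List (List Int)) (Mat2 : List (List Int)) (r : Int) (s : Int) (m : Int) : Bool :=
  decide (-(Mat1.length : Int) ≤ r) && decide (r < (Mat1.length : Int)) &&
  decide (-(Mat2.length : Int) ≤ r) && decide (r < (Mat2.length : Int)) &&
  decide (-((PySem.List.pyGetD Mat1 r []).length : Int) ≤ s) &&
  decide (m ≤ ((PySem.List.pyGetD Mat1 r []).length : Int)) &&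
  decide (-((PySem.List.pyGetD Mat2 r []).length : Int) ≤ s) &&
  decide (m ≤ ((PySem.List.pyGetD Mat2 r []).length : Int))

-- every (row, column) access of the walk from (i, j) is valid under Python indexing: the first
-- row (touched iff j < m) and the generic rows i+1..n-1 (touched iff 0 < m), whose enumeration is
-- guarded by the length bounds so that the condition evaluates fast on any literals.
def pvAccOK (Mat1 : List (List Int)) (Mat2 : List (List Int)) (n : Int) (m : Int) (i : Int) (j : Int) : Bool :=
  (!(decide (i < n) && decide (j < m)) || pvRowOK Mat1 Mat2 i j m) &&
  (!(decide (0 < m) && decide (i + 1 < n)) ||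
    (decide (-(Mat1.length : Int) ≤ i + 1) && decide (n ≤ (Mat1.length : Int)) &&
     (PySem.List.pyRange (i+1) n 1).all (fun r => pvRowOK Mat1 Mat2 r 0 m)))

-- Pre_ is the set of inputs on which Python A returns: its index walk reaches i = n (i = n, or
-- i < n with j ≤ m and either 0 ≤ m or only one row left) and every cell it touches is a valid
-- Python index; outside Pre_ A raises (IndexError). CPython's finite recursion-depth limit is an
-- implementation artefact and is not modelled.
def Pre_suma_matriz_aux (Mat1 : List (List Int)) (Mat2 : List (List Int)) (n : Int) (m : Int) (i : Int) (j : Int) : Prop :=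
  i = n ∨ (i < n ∧ j ≤ m ∧ (0 ≤ m ∨ i + 1 = n) ∧ pvAccOK Mat1 Mat2 n m i j = true)
instance (Mat1 : List (List Int)) (Mat2 : List (List Int)) (n : Int) (m : Int) (i : Int) (j : Int) : Decidable (Pre_suma_matriz_aux Mat1 Mat2 n m i j) := by unfold Pre_suma_matriz_aux; infer_instance

def pvWitness_suma_matriz_aux : List (List Int) × List (List Int) × Int × Int × Int × Int :=
  ([[1, 2], [3, 4]], [[10, 20], [30, 40]], 2, 2, 0, 1)

def Spec_suma_matriz_aux (Mat1 : List (List Int)) (Mat2 : List (List Int)) (n : Int) (m : Int) (i : Int) (j : Int) (out : List (List Int)) : Prop := out = suma_matriz_aux_alt Mat1 Mat2 n m i j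
instance (Mat1 : List (List Int)) (Mat2 : List (List Int)) (n : Int) (m : Int) (i : Int) (j : Int) (out : List (List Int)) : Decidable (Spec_suma_matriz_aux Mat1 Mat2 n m i j out) := by unfold Spec_suma_matriz_aux; infer_instance

-- ===== CLAIM (what is proved, stated in full; the proofs are below) =====
def Claim_equal_suma_matriz_aux : Prop := ∀ (Mat1 : List (List Int)) (Mat2 : List (List Int)) (n : Int) (m : Int) (i : Int) (j : Int), Dom_suma_matriz_aux Mat1 Mat2 n m i j → Pre_suma_matriz_aux Mat1 Mat2 n m i j → Spec_suma_matriz_aux Mat1 Mat2 n m i j (suma_matriz_aux Mat1 Mat2 n m i j)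

-- ===== LEMMAS AND PROOFS =====

-- For any fuel, A's recursion and B's while loop step through the same (Mat1, i, j) states:
-- A's two recursive calls are exactly the two cases of B's step function.
theorem fuelA_eq_whileB (Mat2 : List (List Int)) (n m : Int) :
    ∀ (fuel : Nat) (Mat1 : List (List Int)) (i j : Int),
    pvFuelA fuel Mat1 Mat2 n m i j = (pvWhileB Mat2 n m fuel (Mat1, i, j)).1 := by
  intro fuel
  induction fuel with
  | zero => intro Mat1 i j; simp [pvFuelA, pvWhileB]
  | succ f ih =>
    intro Mat1 i j
    simp only [pvFuelA, pvWhileB, pvStepB]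
    by_cases hi : i = n
    · simp [hi]
    · rw [if_neg hi, if_neg hi]
      by_cases hj : j = m
      · rw [if_pos hj, if_pos hj, ih]
      · rw [if_neg hj, if_neg hj, ih]

-- ===== VERDICT (by name: the statement is the Claim_ definition above) =====
theorem suma_matriz_aux_spec : Claim_equal_suma_matriz_aux := by
  intro Mat1 Mat2 n m i j _ _
  unfold Spec_suma_matriz_aux suma_matriz_aux suma_matriz_aux_alt
  exact fuelA_eq_whileB Mat2 n m (pvFuel n m i j) Mat1 i j
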